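-- pv_equiv track=rewrite | github.com/dtrizna/QuasarNix | experiments/explainability_commands_gpt.py | tokens_for_groups
-- ===== SOURCE A (Python) =====
-- from typing import Dict, List, Tuple, Optional, Any
--
-- def tokens_for_groups(index_to_token: Dict[int, str],
--                       group_map: Dict[str, List[str]]) -> Dict[str, List[int]]:
--     """
--     Resolves feature indices per group by exact token equality against group indicators.
--     """
--     token_to_indices: Dict[str, List[int]] = {}
--     for idx, tok in index_to_token.items():
--         token_to_indices.setdefault(tok, []).append(idx)
--
--     group_to_indices: Dict[str, List[int]] = {}
--     for group_name, indicators in group_map.items():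
--         indices: List[int] = []
--         for indicator in indicators:
--             indices.extend(token_to_indices.get(indicator, []))
--         # Deduplicate while preserving order
--         seen = set()
--         unique_indices = [i for i in indices if not (i in seen or seen.add(i))]
--         group_to_indices[group_name] = unique_indices
--     return group_to_indices
-- ===== SOURCE B (Python) =====
-- def tokens_for_groups(index_to_token, group_map):
--     """
--     Resolves feature indices per group by exact token equality against group indicators.
--     One dict comprehension per group: nested generator gathers matching indices in
--     indicator-then-item order, dict.fromkeys deduplicates preserving first occurrence.
--     """
--     items = list(index_to_token.items())
--     return {
--         group: list(dict.fromkeys(idx for ind in indicators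
--                                   for idx, tok in items if tok == ind))
--         for group, indicators in group_map.items()
--     }
-- ===== Notes on version B (the rewrite author's own statement) =====
-- stated objective: simpler
-- what changed: Replaces A's two staged dict-building passes (inverted token->indices index, then per-group extend + seen-set dedup into an output dict) by a single dict comprehension: a nested generator filters index_to_token per indicator and dict.fromkeys deduplicates preserving order.
import Mathlib
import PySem

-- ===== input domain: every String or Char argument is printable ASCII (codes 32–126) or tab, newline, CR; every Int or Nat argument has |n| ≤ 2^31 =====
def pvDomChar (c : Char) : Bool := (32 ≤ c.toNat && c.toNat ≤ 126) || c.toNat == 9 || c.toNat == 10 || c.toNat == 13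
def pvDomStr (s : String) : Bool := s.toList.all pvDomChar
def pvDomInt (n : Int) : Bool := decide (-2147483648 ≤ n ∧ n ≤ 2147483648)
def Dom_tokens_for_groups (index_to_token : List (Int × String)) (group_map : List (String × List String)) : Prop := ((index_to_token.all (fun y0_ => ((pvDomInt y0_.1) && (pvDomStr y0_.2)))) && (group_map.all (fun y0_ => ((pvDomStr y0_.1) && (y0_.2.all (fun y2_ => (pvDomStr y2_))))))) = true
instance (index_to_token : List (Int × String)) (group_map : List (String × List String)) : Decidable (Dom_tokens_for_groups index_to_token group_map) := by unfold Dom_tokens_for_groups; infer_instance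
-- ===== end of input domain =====

-- B replaces A's two staged dict-building passes (inverted index, then extend + seen-set dedup)
-- by one dict comprehension per group with dict.fromkeys dedup (simpler, not faster).

-- ===== PORT A =====
def tokens_for_groups (index_to_token : List (Int × String)) (group_map : List (String × List String)) : List (String × List Int) :=
  let itemsIT : List (Int × String) := (PySem.Dict.ofList index_to_token).items
  let token_to_indices : PySem.Dict String (List Int) :=
    itemsIT.foldl (fun (d : PySem.Dict String (List Int)) (p : Int × String) => d.modify p.2 [] (· ++ [p.1])) PySem.Dict.empty
  let group_to_indices : PySem.Dict String (List Int) :=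
    ((PySem.Dict.ofList group_map).items).foldl (fun (out : PySem.Dict String (List Int)) (g : String × List String) =>
      let indices : List Int := g.2.foldl (fun (acc : List Int) (ind : String) => acc ++ token_to_indices.getD ind []) []
      let su : PySem.Set Int × List Int := indices.foldl (fun (su : PySem.Set Int × List Int) (i : Int) =>
          if PySem.Set.contains su.1 i then su else (PySem.Set.add su.1 i, su.2 ++ [i]))
        ((PySem.Set.empty : PySem.Set Int), ([] : List Int))
      out.insert g.1 su.2) PySem.Dict.empty
  group_to_indices.items

-- ===== PORT B =====
def tokens_for_groups_alt (index_to_token : List (Int × String)) (group_map : List (String × List String)) : List (String × List Int) :=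
  let items : List (Int × String) := (PySem.Dict.ofList index_to_token).items
  ((PySem.Dict.ofList group_map).items).map (fun (g : String × List String) =>
    (g.1, PySem.List.dedup (g.2.flatMap (fun ind => (items.filter (fun p => p.2 == ind)).map (·.1)))))

-- ===== PRECONDITION & SPEC =====
def Spec_tokens_for_groups (index_to_token : List (Int × String)) (group_map : List (String × List String)) (out : List (String × List Int)) : Prop := out = tokens_for_groups_alt index_to_token group_map
instance (index_to_token : List (Int × String)) (group_map : List (String × List String)) (out : List (String × List Int)) : Decidable (Spec_tokens_for_groups index_to_token group_map out) := by unfold Spec_tokens_for_groups; infer_instance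

-- ===== CLAIM (what is proved, stated in full; the proofs are below) =====
def Claim_equal_tokens_for_groups : Prop := ∀ (index_to_token : List (Int × String)) (group_map : List (String × List String)), Dom_tokens_for_groups index_to_token group_map → Spec_tokens_for_groups index_to_token group_map (tokens_for_groups index_to_token group_map)

-- ===== LEMMAS AND PROOFS =====

/-- A's inverted-index entry at `c` is the list of indices whose token equals `c`. -/
lemma pv_getD_build (l : List (Int × String)) (c : String) :
    (l.foldl (fun (d : PySem.Dict String (List Int)) (p : Int × String) => d.modify p.2 [] (· ++ [p.1])) PySem.Dict.empty).getD c []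
      = (l.filter (fun p => p.2 == c)).map (·.1) := by
  have h : l.foldl (fun (d : PySem.Dict String (List Int)) (p : Int × String) => d.modify p.2 [] (· ++ [p.1])) PySem.Dict.empty
      = (l.map Prod.swap).foldl (fun (d : PySem.Dict String (List Int)) (q : String × Int) => d.modify q.1 [] (· ++ [q.2])) PySem.Dict.empty := by
    rw [List.foldl_map]; rfl
  rw [h, PySem.Dict.getD_foldl_modify_append]
  simp [List.filter_map, Function.comp_def, List.map_map]

/-- The set-based inline dedup loop, started on a diagonal pair, computes `foldl Set.add`. -/
lemma pv_dedup_fold (xs : List Int) :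
    ∀ s : PySem.Set Int,
      (xs.foldl (fun (su : PySem.Set Int × List Int) (i : Int) =>
          if PySem.Set.contains su.1 i then su else (PySem.Set.add su.1 i, su.2 ++ [i])) (s, s)).2
      = xs.foldl PySem.Set.add s := by
  induction xs with
  | nil => intro s; rfl
  | cons x xs ih =>
      intro s
      rw [List.foldl_cons, List.foldl_cons]
      have hadd : (if PySem.Set.contains s x then (s, s) else (PySem.Set.add s x, s ++ [x]))
          = (PySem.Set.add s x, PySem.Set.add s x) := by
        by_cases h : x ∈ s
        · simp [PySem.Set.contains, PySem.Set.add, h]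
        · simp [PySem.Set.contains, PySem.Set.add, h]
      rw [show (if PySem.Set.contains (s, s).1 x then (s, s) else (PySem.Set.add (s, s).1 x, (s, s).2 ++ [x])) = (PySem.Set.add s x, PySem.Set.add s x) from hadd]
      exact ih _

/-- The value A stores for one group equals the value B computes for it. -/
lemma pv_group_val (itemsIT : List (Int × String)) (inds : List String) :
    ((inds.foldl (fun (acc : List Int) (ind : String) =>
        acc ++ (itemsIT.foldl (fun (d : PySem.Dict String (List Int)) (p : Int × String) =>
          d.modify p.2 [] (· ++ [p.1])) PySem.Dict.empty).getD ind []) []).foldl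
      (fun (su : PySem.Set Int × List Int) (i : Int) =>
        if PySem.Set.contains su.1 i then su else (PySem.Set.add su.1 i, su.2 ++ [i]))
      ((PySem.Set.empty : PySem.Set Int), ([] : List Int))).2
    = PySem.List.dedup (inds.flatMap (fun ind => (itemsIT.filter (fun p => p.2 == ind)).map (·.1))) := by
  have hext : inds.foldl (fun (acc : List Int) (ind : String) =>
        acc ++ (itemsIT.foldl (fun (d : PySem.Dict String (List Int)) (p : Int × String) =>
          d.modify p.2 [] (· ++ [p.1])) PySem.Dict.empty).getD ind []) []
      = inds.flatMap (fun ind => (itemsIT.filter (fun p => p.2 == ind)).map (·.1)) := by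
    rw [PySem.List.foldl_append_eq_flatMap]
    simp only [List.nil_append]
    congr 1
    funext ind
    exact pv_getD_build itemsIT ind
  rw [hext]
  have hempty : (PySem.Set.empty : PySem.Set Int) = ([] : List Int) := rfl
  rw [hempty, pv_dedup_fold, PySem.List.dedup_eq_ofList, PySem.Set.ofList_eq_foldl]

/-- A's output-dict building loop over the distinct group keys appends one item per group. -/
lemma pv_out_items (gs : List (String × List String)) (hnd : (gs.map (·.1)).Nodup)
    (f : String × List String → List Int) :
    (gs.foldl (fun (out : PySem.Dict String (List Int)) (g : String × List String) =>
        out.insert g.1 (f g)) PySem.Dict.empty).items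
    = gs.map (fun g => (g.1, f g)) := by
  have h := PySem.Dict.items_foldl_insert_fresh (l := gs) (k := (·.1)) (v := f)
    (d := (PySem.Dict.empty : PySem.Dict String (List Int)))
    (by intro a _; rfl) hnd
  simpa using h

-- ===== VERDICT (by name: the statement is the Claim_ definition above) =====
theorem tokens_for_groups_spec : Claim_equal_tokens_for_groups := by
  intro index_to_token group_map _
  unfold Spec_tokens_for_groups
  simp only [tokens_for_groups, tokens_for_groups_alt]
  rw [pv_out_items _ (PySem.Dict.nodup_keys_ofList group_map) _]
  congr 1
  funext g
  congr 1
  exact pv_group_val (PySem.Dict.ofList index_to_token).items g.2
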